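-- pv_equiv track=rewrite | github.com/sebasto7/connectome-analysis | optic_flow-analysis/helper.py | get_hexagons_reference_equators
-- ===== SOURCE A (Python) =====
-- def get_hexagons_reference_equators(reference_axes_dict, map_type, x_start = -30, x_steps = 50):
--     """
--
--     Add Docstring once the function is complete
--
--     """
--     # Needed variables
--     h_x_ls = reference_axes_dict['h_x_ls']
--     h_x_ls = [x+x_start for x in h_x_ls]
--     h_y_ls = reference_axes_dict['h_y_ls']
--
--     equators_list = []
--     for i in range(x_steps):
--         h_x_ls = [x+1 for x in h_x_ls]
--         # Coloruing the hexagons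
--         h = list(zip(h_x_ls,h_y_ls))
--         equators_list.append(h)
--     return equators_list
-- ===== SOURCE B (Python) =====
-- def get_hexagons_reference_equators(reference_axes_dict, map_type, x_start=-30, x_steps=50):
--     # Point-major strategy: build, for each hexagon (x, y), its whole trajectory of
--     # shifted positions across the steps, then transpose trajectories into per-step rows.
--     pairs = list(zip(reference_axes_dict['h_x_ls'], reference_axes_dict['h_y_ls']))
--     tracks = [[(x + x_start + j, y) for j in range(1, x_steps + 1)] for x, y in pairs]
--     return [[t[i] for t in tracks] for i in range(x_steps)]
-- ===== Notes on version B (the rewrite author's own statement) =====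
-- stated objective: alternative
-- what changed: B is point-major: it builds, for each hexagon, its whole trajectory of shifted positions across all steps, then transposes the trajectories into per-step rows by indexing, instead of A's step-major loop that keeps re-incrementing a running x-list and zipping it each iteration.
import Mathlib
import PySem

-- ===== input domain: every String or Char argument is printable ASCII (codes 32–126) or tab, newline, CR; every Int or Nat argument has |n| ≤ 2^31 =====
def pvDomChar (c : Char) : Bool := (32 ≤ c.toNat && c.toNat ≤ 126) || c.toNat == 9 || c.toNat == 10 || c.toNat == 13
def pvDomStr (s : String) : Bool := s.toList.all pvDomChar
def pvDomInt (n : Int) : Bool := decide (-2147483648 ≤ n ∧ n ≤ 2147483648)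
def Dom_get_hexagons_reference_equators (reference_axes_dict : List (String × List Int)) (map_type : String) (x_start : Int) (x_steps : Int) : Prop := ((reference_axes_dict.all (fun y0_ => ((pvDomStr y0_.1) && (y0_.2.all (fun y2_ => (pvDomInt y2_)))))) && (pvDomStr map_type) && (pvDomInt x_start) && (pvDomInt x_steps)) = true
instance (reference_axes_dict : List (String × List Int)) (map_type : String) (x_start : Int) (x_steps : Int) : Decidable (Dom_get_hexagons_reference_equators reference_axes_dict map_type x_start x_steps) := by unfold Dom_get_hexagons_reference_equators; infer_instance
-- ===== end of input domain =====

-- B is point-major: each hexagon's whole trajectory of shifted positions is built first,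
-- then the trajectories are transposed by index into per-step rows, instead of A's
-- step-major loop that re-increments a running x-list. Objective: alternative.

-- ===== PORT A =====
-- first-match association-list lookup = Python dict subscript (none = KeyError)
def pvLookupA (d : List (String × List Int)) (k : String) : Option (List Int) :=
  (d.find? (fun p => p.1 == k)).map (·.2)

def get_hexagons_reference_equators (reference_axes_dict : List (String × List Int)) (map_type : String) (x_start : Int) (x_steps : Int) : List (List (Int × Int)) :=
  match pvLookupA reference_axes_dict "h_x_ls", pvLookupA reference_axes_dict "h_y_ls" with
  | some hx0, some h_y_ls =>
    let h_x_ls := hx0.map (fun x => x + x_start)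
    (((PySem.List.pyRange 0 x_steps 1).foldl
        (fun (st : List Int × List (List (Int × Int))) _ =>
          let hx' := st.1.map (fun x => x + 1)
          (hx', st.2 ++ [hx'.zip h_y_ls]))
        (h_x_ls, []))).2
  | _, _ => []  -- unreachable under Pre_ (KeyError in Python)

-- ===== PORT B =====
-- B's own copy of the first-match lookup (dict subscript)
def pvLookupB : List (String × List Int) → String → Option (List Int)
  | [], _ => none
  | (k', v) :: rest, k => if k' == k then some v else pvLookupB rest k

def get_hexagons_reference_equators_alt (reference_axes_dict : List (String × List Int)) (map_type : String) (x_start : Int) (x_steps : Int) : List (List (Int × Int)) :=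
  match pvLookupB reference_axes_dict "h_x_ls" with
  | none => []  -- unreachable under Pre_ (KeyError in Python)
  | some hx0 =>
   match pvLookupB reference_axes_dict "h_y_ls" with
   | none => []  -- unreachable under Pre_ (KeyError in Python)
   | some hy0 =>
    let pairs := hx0.zip hy0
    let tracks := pairs.map (fun p =>
      (PySem.List.pyRange 1 (x_steps + 1) 1).map (fun j => (p.1 + x_start + j, p.2)))
    -- t[i]: the index is always in range (each track has length x_steps), so the
    -- default of pyGetD is never used
    (PySem.List.pyRange 0 x_steps 1).map (fun i =>
      tracks.map (fun t => PySem.List.pyGetD t i (0, 0)))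

-- ===== PRECONDITION & SPEC =====
-- A raises KeyError when 'h_x_ls' or 'h_y_ls' is missing from the dict; Pre_ requires both keys.
def Pre_get_hexagons_reference_equators (reference_axes_dict : List (String × List Int)) (map_type : String) (x_start : Int) (x_steps : Int) : Prop :=
  (reference_axes_dict.find? (fun p => p.1 == "h_x_ls")).isSome = true ∧
  (reference_axes_dict.find? (fun p => p.1 == "h_y_ls")).isSome = true
instance (reference_axes_dict : List (String × List Int)) (map_type : String) (x_start : Int) (x_steps : Int) : Decidable (Pre_get_hexagons_reference_equators reference_axes_dict map_type x_start x_steps) := by unfold Pre_get_hexagons_reference_equators; infer_instance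
def pvWitness_get_hexagons_reference_equators : (List (String × List Int)) × String × Int × Int :=
  ([("h_x_ls", [1, 2]), ("h_y_ls", [3, 4])], "hex", -1, 2)

def Spec_get_hexagons_reference_equators (reference_axes_dict : List (String × List Int)) (map_type : String) (x_start : Int) (x_steps : Int) (out : List (List (Int × Int))) : Prop := out = get_hexagons_reference_equators_alt reference_axes_dict map_type x_start x_steps
instance (reference_axes_dict : List (String × List Int)) (map_type : String) (x_start : Int) (x_steps : Int) (out : List (List (Int × Int))) : Decidable (Spec_get_hexagons_reference_equators reference_axes_dict map_type x_start x_steps out) := by unfold Spec_get_hexagons_reference_equators; infer_instance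

-- ===== CLAIM =====
def Claim_equal_get_hexagons_reference_equators : Prop := ∀ (reference_axes_dict : List (String × List Int)) (map_type : String) (x_start : Int) (x_steps : Int), Dom_get_hexagons_reference_equators reference_axes_dict map_type x_start x_steps → Pre_get_hexagons_reference_equators reference_axes_dict map_type x_start x_steps → Spec_get_hexagons_reference_equators reference_axes_dict map_type x_start x_steps (get_hexagons_reference_equators reference_axes_dict map_type x_start x_steps)

-- ===== LEMMAS AND PROOFS =====

-- B's recursive lookup computes the same first-match lookup as A's find?-based one
lemma pvLookupB_eq (d : List (String × List Int)) (k : String) : pvLookupB d k = pvLookupA d k := by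
  induction d with
  | nil => simp [pvLookupB, pvLookupA]
  | cons h t ih =>
    obtain ⟨k', v⟩ := h
    simp only [pvLookupB, pvLookupA, List.find?]
    cases hh : (k' == k) <;> simp_all [pvLookupA]

-- zip of a mapped-left list as a map over the zip
lemma pv_map_zip_left {α β : Type} (f : α → α) (l : List α) (l' : List β) :
    (l.map f).zip l' = (l.zip l').map (fun p => (f p.1, p.2)) := by
  induction l generalizing l' with
  | nil => simp
  | cons a t ih =>
    cases l' with
    | nil => simp
    | cons b t' => simp [ih]

-- invariant of A's loop over range(n): after n iterations the running x-list is base shifted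
-- by n, and the accumulator holds rows whose x-values are base plus k+1 for k = 0..n-1.
lemma fold_spec (hy base : List Int) (acc : List (List (Int × Int))) (n : Nat) :
    (((List.range n).map (fun k => Int.ofNat k)).foldl
        (fun (st : List Int × List (List (Int × Int))) _ =>
          let hx' := st.1.map (fun x => x + 1)
          (hx', st.2 ++ [hx'.zip hy]))
        (base, acc))
    = (base.map (fun x => x + (n : Int)),
       acc ++ (List.range n).map
         (fun k => (base.zip hy).map (fun p => (p.1 + Int.ofNat k + 1, p.2)))) := by
  induction n generalizing acc with
  | zero => simp
  | succ m ih =>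
    rw [List.range_succ, List.map_append, List.foldl_append, ih]
    simp only [List.map_cons, List.map_nil, List.foldl_cons, List.foldl_nil, List.map_map,
      List.map_append]
    rw [Prod.mk.injEq]
    constructor
    · apply List.map_congr_left; intro x _; simp only [Function.comp_apply]; push_cast; ring
    · rw [List.append_assoc]
      congr 1
      congr 1
      rw [pv_map_zip_left]
      rfl

lemma pyRange_zero_cast (n : Int) :
    PySem.List.pyRange 0 n 1 = (List.range n.toNat).map (fun k => Int.ofNat k) := by
  rw [PySem.List.pyRange_one]
  simp

-- ===== VERDICT =====
theorem get_hexagons_reference_equators_spec : Claim_equal_get_hexagons_reference_equators := by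
  intro d mt x_start x_steps _ hpre
  obtain ⟨h1, h2⟩ := hpre
  unfold Spec_get_hexagons_reference_equators
  unfold get_hexagons_reference_equators get_hexagons_reference_equators_alt
  obtain ⟨px, hpx⟩ := Option.isSome_iff_exists.mp h1
  obtain ⟨py, hpy⟩ := Option.isSome_iff_exists.mp h2
  simp only [pvLookupB_eq, pvLookupA, hpx, hpy, Option.map_some]
  simp only [pyRange_zero_cast]
  rw [fold_spec]
  simp only [List.nil_append, List.map_map]
  apply List.map_congr_left
  intro k hk
  have hk' : k < x_steps.toNat := List.mem_range.mp hk
  simp only [Function.comp_apply]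
  rw [pv_map_zip_left]
  simp only [List.map_map]
  apply List.map_congr_left
  intro p _
  simp only [Function.comp_apply, Int.ofNat_eq_natCast]
  rw [PySem.List.pyGetD_map_pyRange_one _ 1 (x_steps + 1) k _ (by omega)]
  refine Prod.ext ?_ rfl
  push_cast
  ring
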